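-- pv_equiv track=rewrite | github.com/dreamrec/LivePilot | mcp_server/tools/_theory_engine.py | chord_name
-- ===== SOURCE A (Python) =====
-- NOTE_NAMES = ['C', 'C#', 'D', 'D#', 'E', 'F', 'F#', 'G', 'G#', 'A', 'A#', 'B']
--
-- CHORD_PATTERNS = {
--     (0, 4, 7): 'major triad', (0, 3, 7): 'minor triad',
--     (0, 3, 6): 'diminished triad', (0, 4, 8): 'augmented triad',
--     (0, 2, 7): 'sus2', (0, 5, 7): 'sus4',
--     (0, 4, 7, 11): 'major seventh', (0, 3, 7, 10): 'minor seventh',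
--     (0, 4, 7, 10): 'dominant seventh', (0, 3, 6, 9): 'diminished seventh',
--     (0, 3, 6, 10): 'half-diminished seventh',
-- }
--
-- def chord_name(midi_pitches: list[int]) -> str:
--     """Identify chord from MIDI pitches -> 'C-major triad'."""
--     pcs = sorted(set(p % 12 for p in midi_pitches))
--     if not pcs:
--         return "unknown"
--     # Try each pitch class as potential root
--     for root in pcs:
--         intervals = tuple(sorted((pc - root) % 12 for pc in pcs))
--         if intervals in CHORD_PATTERNS:
--             return f"{NOTE_NAMES[root]}-{CHORD_PATTERNS[intervals]}"
--     return f"{NOTE_NAMES[pcs[0]]} chord"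
-- ===== SOURCE B (Python) =====
-- NOTE_NAMES = ['C', 'C#', 'D', 'D#', 'E', 'F', 'F#', 'G', 'G#', 'A', 'A#', 'B']
--
-- CHORD_PATTERNS = {
--     (0, 4, 7): 'major triad', (0, 3, 7): 'minor triad',
--     (0, 3, 6): 'diminished triad', (0, 4, 8): 'augmented triad',
--     (0, 2, 7): 'sus2', (0, 5, 7): 'sus4',
--     (0, 4, 7, 11): 'major seventh', (0, 3, 7, 10): 'minor seventh',
--     (0, 4, 7, 10): 'dominant seventh', (0, 3, 6, 9): 'diminished seventh',
--     (0, 3, 6, 10): 'half-diminished seventh',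
-- }
--
-- # Precomputed table: pitch-class set -> full chord label.  Roots are tried in
-- # ascending order and existing entries are never overwritten, so symmetric
-- # chords (augmented, diminished seventh) keep the smallest root.
-- _TABLE = {}
-- for _root in range(12):
--     for _pattern, _name in CHORD_PATTERNS.items():
--         _key = frozenset((_root + i) % 12 for i in _pattern)
--         if _key not in _TABLE:
--             _TABLE[_key] = f"{NOTE_NAMES[_root]}-{_name}"
--
--
-- def chord_name(midi_pitches: list[int]) -> str:
--     """Identify chord from MIDI pitches -> 'C-major triad'."""
--     pcs = frozenset(p % 12 for p in midi_pitches)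
--     if not pcs:
--         return "unknown"
--     if pcs in _TABLE:
--         return _TABLE[pcs]
--     return f"{NOTE_NAMES[min(pcs)]} chord"
-- ===== Notes on version B (the rewrite author's own statement) =====
-- stated objective: alternative
-- what changed: Replaces A's per-call scan over candidate roots (re-sorting the interval set for each root) with a table precomputed once mapping each chord's pitch-class frozenset to its full label, built over roots 0..11 in ascending order without overwriting so symmetric chords keep the smallest root; chord_name becomes a single set lookup with the same empty/fallback cases.
import Mathlib
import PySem

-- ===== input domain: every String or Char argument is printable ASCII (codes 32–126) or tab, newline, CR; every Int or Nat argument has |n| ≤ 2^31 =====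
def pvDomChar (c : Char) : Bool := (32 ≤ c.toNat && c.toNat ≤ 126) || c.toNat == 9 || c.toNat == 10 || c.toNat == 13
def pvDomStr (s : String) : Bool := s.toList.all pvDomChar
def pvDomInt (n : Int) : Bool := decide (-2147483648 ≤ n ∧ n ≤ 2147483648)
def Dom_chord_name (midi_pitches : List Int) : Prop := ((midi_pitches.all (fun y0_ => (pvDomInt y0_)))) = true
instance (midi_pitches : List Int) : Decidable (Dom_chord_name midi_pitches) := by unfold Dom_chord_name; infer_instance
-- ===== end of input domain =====

-- B replaces A's per-root rescan by a precomputed pitch-class-set → label table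
-- (built root-ascending without overwrite); alternative data structure, same cost class.

-- ===== PORT A =====
def noteNames : List String :=
  ["C", "C#", "D", "D#", "E", "F", "F#", "G", "G#", "A", "A#", "B"]

def chordPatterns : PySem.Dict (List Int) String := PySem.Dict.ofList
  [([0, 4, 7], "major triad"), ([0, 3, 7], "minor triad"),
   ([0, 3, 6], "diminished triad"), ([0, 4, 8], "augmented triad"),
   ([0, 2, 7], "sus2"), ([0, 5, 7], "sus4"),
   ([0, 4, 7, 11], "major seventh"), ([0, 3, 7, 10], "minor seventh"),
   ([0, 4, 7, 10], "dominant seventh"), ([0, 3, 6, 9], "diminished seventh"),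
   ([0, 3, 6, 10], "half-diminished seventh")]

-- A's 'for root in pcs' loop with its post-loop fallback; the NOTE_NAMES / pcs
-- indices are provably in range, so '.getD' defaults are never taken.
def chordLoopA (pcs : List Int) : List Int → String
  | [] => (PySem.List.pyGet? noteNames ((PySem.List.pyGet? pcs 0).getD 0)).getD "" ++ " chord"
  | root :: rest =>
    let intervals := PySem.List.sorted (pcs.map (fun pc => PySem.Int.mod (pc - root) 12)) (fun x => x) false
    match chordPatterns.get? intervals with
    | some nm => (PySem.List.pyGet? noteNames root).getD "" ++ "-" ++ nm
    | none => chordLoopA pcs rest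

def chordFromPcsA (pcs : List Int) : String :=
  if pcs = [] then "unknown" else chordLoopA pcs pcs

def chord_name (midi_pitches : List Int) : String :=
  chordFromPcsA (PySem.List.sorted (PySem.Set.ofList (midi_pitches.map (fun p => PySem.Int.mod p 12))) (fun x => x) false)

-- ===== PORT B =====
-- A Python frozenset of pitch classes is modeled canonically as its
-- strictly-sorted element list (frozenset equality = equality of these lists).
def chordTable : PySem.Dict (List Int) String :=
  (PySem.List.pyRange 0 12 1).foldl (fun d root =>
    chordPatterns.items.foldl (fun d pv =>
      let key := PySem.List.sorted (PySem.Set.ofList (pv.1.map (fun i => PySem.Int.mod (root + i) 12))) (fun x => x) false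
      if d.contains key then d
      else d.insert key ((PySem.List.pyGet? noteNames root).getD "" ++ "-" ++ pv.2)) d)
    PySem.Dict.empty

def chordFromPcsB (pcs : List Int) : String :=
  if pcs = [] then "unknown" else
    match chordTable.get? pcs with
    | some s => s
    | none => (PySem.List.pyGet? noteNames ((PySem.List.min? pcs (fun x => x)).getD 0)).getD "" ++ " chord"

def chord_name_alt (midi_pitches : List Int) : String :=
  chordFromPcsB (PySem.List.sorted (PySem.Set.ofList (midi_pitches.map (fun p => PySem.Int.mod p 12))) (fun x => x) false)

-- ===== PRECONDITION & SPEC =====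
def Spec_chord_name (midi_pitches : List Int) (out : String) : Prop := out = chord_name_alt midi_pitches
instance (midi_pitches : List Int) (out : String) : Decidable (Spec_chord_name midi_pitches out) := by unfold Spec_chord_name; infer_instance

-- ===== CLAIM (what is proved, stated in full; the proofs are below) =====
def Claim_equal_chord_name : Prop := ∀ (midi_pitches : List Int), Dom_chord_name midi_pitches → Spec_chord_name midi_pitches (chord_name midi_pitches)

-- ===== LEMMAS AND PROOFS =====

-- All 4096 possible pitch-class sets, as strictly sorted lists.
def pcCandidates : List (List Int) := (((List.range 12).map Int.ofNat).sublists)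

set_option maxRecDepth 100000 in
set_option maxHeartbeats 1000000 in
lemma core_eq_small :
    ((pcCandidates.filter (fun l => l.length == 3 || l.length == 4)).all
      (fun l => chordFromPcsA l == chordFromPcsB l)) = true := by decide

lemma patterns_key_len : ∀ k ∈ chordPatterns.keys, k.length = 3 ∨ k.length = 4 := by decide

set_option maxRecDepth 20000 in
lemma table_key_len : ∀ k ∈ chordTable.keys, k.length = 3 ∨ k.length = 4 := by decide

lemma range12_pairwise : (((List.range 12).map Int.ofNat).Pairwise (· < ·)) := by decide

lemma pcs_mem_candidates (xs : List Int) :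
    PySem.List.sorted (PySem.Set.ofList (xs.map (fun p => PySem.Int.mod p 12))) (fun x => x) false ∈ pcCandidates := by
  set pcs := PySem.List.sorted (PySem.Set.ofList (xs.map (fun p => PySem.Int.mod p 12))) (fun x => x) false with hpcs
  have hpw : pcs.Pairwise (· < ·) := PySem.List.sorted_ofList_pairwise_lt _
  have hbound : ∀ x ∈ pcs, 0 ≤ x ∧ x < 12 := by
    intro x hx
    have hx' : x ∈ PySem.Set.ofList (xs.map (fun p => PySem.Int.mod p 12)) :=
      (PySem.List.mem_sorted _ _ _ _).mp hx
    have hx'' : x ∈ xs.map (fun p => PySem.Int.mod p 12) := by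
      simpa [PySem.Set.mem_ofList] using hx'
    rcases List.mem_map.mp hx'' with ⟨p, _, rfl⟩
    exact ⟨PySem.Int.mod_nonneg p (by norm_num), PySem.Int.mod_lt p (by norm_num)⟩
  have hsub : pcs ⊆ (List.range 12).map Int.ofNat := by
    intro x hx
    rcases hbound x hx with ⟨h0, h12⟩
    refine List.mem_map.mpr ⟨x.toNat, List.mem_range.mpr (by omega), ?_⟩
    simpa using Int.toNat_of_nonneg h0
  have hnodup : pcs.Nodup := hpw.imp (fun h => ne_of_lt h)
  have hsl : List.Sublist pcs ((List.range 12).map Int.ofNat) :=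
    List.sublist_of_subperm_of_pairwise (List.subperm_of_subset hnodup hsub) hpw range12_pairwise
  simpa [pcCandidates, List.mem_sublists] using hsl

lemma foldl_min_eq (t : List Int) (x : Int) (h : ∀ y ∈ t, x ≤ y) : t.foldl min x = x := by
  induction t generalizing x with
  | nil => rfl
  | cons y t ih =>
    simp only [List.foldl_cons]
    rw [min_eq_left (h y (by simp))]
    exact ih x (fun z hz => h z (by simp [hz]))

-- With a pitch-class list whose size matches no pattern, A's loop falls through.
lemma loop_no_match (l : List Int) (h3 : l.length ≠ 3) (h4 : l.length ≠ 4) :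
    ∀ rest, chordLoopA l rest
      = (PySem.List.pyGet? noteNames ((PySem.List.pyGet? l 0).getD 0)).getD "" ++ " chord" := by
  intro rest
  induction rest with
  | nil => rfl
  | cons root rest ih =>
    have hlen : (PySem.List.sorted (l.map (fun pc => PySem.Int.mod (pc - root) 12)) (fun x => x) false).length = l.length := by
      rw [PySem.List.length_sorted, List.length_map]
    have hnone : chordPatterns.get? (PySem.List.sorted (l.map (fun pc => PySem.Int.mod (pc - root) 12)) (fun x => x) false) = none := by
      rw [PySem.Dict.get?_eq_none_iff_not_mem_keys]
      intro hmem
      rcases patterns_key_len _ hmem with h | h <;> rw [hlen] at h <;> [exact h3 h; exact h4 h]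
    simp only [chordLoopA, hnone]
    exact ih

lemma table_no_match (l : List Int) (h3 : l.length ≠ 3) (h4 : l.length ≠ 4) :
    chordTable.get? l = none := by
  rw [PySem.Dict.get?_eq_none_iff_not_mem_keys]
  intro hmem
  rcases table_key_len _ hmem with h | h
  · exact h3 h
  · exact h4 h

lemma core_eq (l : List Int) (hl : l ∈ pcCandidates) : chordFromPcsA l = chordFromPcsB l := by
  by_cases h3 : l.length = 3
  · exact eq_of_beq (List.all_eq_true.mp core_eq_small l
      (List.mem_filter.mpr ⟨hl, by simp [h3]⟩))
  by_cases h4 : l.length = 4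
  · exact eq_of_beq (List.all_eq_true.mp core_eq_small l
      (List.mem_filter.mpr ⟨hl, by simp [h4]⟩))
  -- no 3- or 4-element pattern can match: both sides take their fallback
  have hpw : l.Pairwise (· < ·) := by
    have hsl : List.Sublist l ((List.range 12).map Int.ofNat) := by
      simpa [pcCandidates, List.mem_sublists] using hl
    exact range12_pairwise.sublist hsl
  unfold chordFromPcsA chordFromPcsB
  by_cases hnil : l = []
  · simp [hnil]
  · simp only [hnil, if_false]
    rw [loop_no_match l h3 h4, table_no_match l h3 h4]
    obtain ⟨x, t, rfl⟩ : ∃ x t, l = x :: t := by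
      cases l with
      | nil => exact absurd rfl hnil
      | cons x t => exact ⟨x, t, rfl⟩
    have hmin : PySem.List.min? (x :: t) (fun x => x) = some x := by
      rw [PySem.List.min?_id_cons]
      congr 1
      exact foldl_min_eq t x (fun y hy => le_of_lt ((List.pairwise_cons.mp hpw).1 y hy))
    rw [PySem.List.pyGet?_zero_cons, hmin]

-- ===== VERDICT (by name: the statement is the Claim_ definition above) =====
theorem chord_name_spec : Claim_equal_chord_name := by
  intro midi_pitches _
  unfold Spec_chord_name chord_name chord_name_alt
  exact core_eq _ (pcs_mem_candidates midi_pitches)
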